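-- pv_equiv track=rewrite | github.com/Wh4rp/Competitive-Programming | Problems/binarysearch/Count Substrings With All 1s.py | solve
-- ===== SOURCE A (Python) =====
-- def solve(s):
--     s += "0"
--     ans = 0
--     aux_count = 0
--     for c in s:
--         if c == "1":
--             aux_count += 1
--         else:
--             ans += (aux_count)*(aux_count+1)//2
--             aux_count = 0
--     return ans
-- ===== SOURCE B (Python) =====
-- def solve(s):
--     # Divide and conquer: each half reports (count, prefix-1s, suffix-1s);
--     # merging adds the cross term suffix(left) * prefix(right).
--     def rec(t):
--         n = len(t)
--         if n == 0:
--             return (0, 0, 0)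
--         if n == 1:
--             return (1, 1, 1) if t == "1" else (0, 0, 0)
--         m = n // 2
--         c1, p1, s1 = rec(t[:m])
--         c2, p2, s2 = rec(t[m:])
--         return (c1 + c2 + s1 * p2,
--                 p1 + (p2 if p1 == m else 0),
--                 s2 + (s1 if s2 == n - m else 0))
--     return rec(s)[0]
-- ===== Notes on version B (the rewrite author's own statement) =====
-- stated objective: alternative
-- what changed: B replaces A's single left-to-right accumulator sweep by a divide-and-conquer recursion: each half of the string returns a triple (count, length of prefix of 1s, length of suffix of 1s) and the halves are merged with the cross term suffix(left)*prefix(right).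
import Mathlib
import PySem

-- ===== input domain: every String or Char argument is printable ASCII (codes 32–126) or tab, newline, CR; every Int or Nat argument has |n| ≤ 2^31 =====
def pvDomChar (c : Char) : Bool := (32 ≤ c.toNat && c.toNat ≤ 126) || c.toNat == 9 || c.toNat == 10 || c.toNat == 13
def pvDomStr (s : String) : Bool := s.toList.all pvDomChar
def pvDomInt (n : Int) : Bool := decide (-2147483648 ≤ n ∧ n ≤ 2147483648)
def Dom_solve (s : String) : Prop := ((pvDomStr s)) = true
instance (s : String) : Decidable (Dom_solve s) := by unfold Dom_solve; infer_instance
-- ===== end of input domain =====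

-- B counts the same substrings by divide and conquer (count/prefix-1s/suffix-1s per half,
-- merged with a cross term) instead of A's accumulator sweep; same value, alternative algorithm.

-- ===== PORT A =====
-- A appends "0" then sweeps left to right, flushing the run counter on every non-'1'.
def stepA (st : Int × Int) (c : Char) : Int × Int :=
  if c = '1' then (st.1, st.2 + 1)
  else (st.1 + PySem.Int.floordiv (st.2 * (st.2 + 1)) 2, 0)

def solve (s : String) : Int :=
  ((s.toList ++ ['0']).foldl stepA (0, 0)).1

-- ===== PORT B =====
-- rec of Source B: (count, prefix ones, suffix ones) of a slice, merged with cross term s1*p2.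
def recB (l : List Char) : Int × Int × Int :=
  if l.length = 0 then (0, 0, 0)
  else if l.length = 1 then (if l = ['1'] then (1, 1, 1) else (0, 0, 0))
  else
    let m := l.length / 2
    let r1 := recB (l.take m)
    let r2 := recB (l.drop m)
    (r1.1 + r2.1 + r1.2.2 * r2.2.1,
     r1.2.1 + (if r1.2.1 = (m : Int) then r2.2.1 else 0),
     r2.2.2 + (if r2.2.2 = ((l.length - m : Nat) : Int) then r1.2.2 else 0))
termination_by l.length
decreasing_by
  · simpa using by omega
  · simpa using by omega

def solve_alt (s : String) : Int := (recB s.toList).1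

-- ===== PRECONDITION & SPEC =====
def Spec_solve (s : String) (out : Int) : Prop := out = solve_alt s
instance (s : String) (out : Int) : Decidable (Spec_solve s out) := by unfold Spec_solve; infer_instance

-- ===== CLAIM (what is proved, stated in full; the proofs are below) =====
def Claim_equal_solve : Prop := ∀ (s : String), Dom_solve s → Spec_solve s (solve s)

-- ===== LEMMAS AND PROOFS =====

-- length of the maximal prefix / suffix of '1's
def pfxN (l : List Char) : Nat := (l.takeWhile (fun c => c = '1')).length
def sfxN (l : List Char) : Nat := pfxN l.reverse
-- triangle number, as Int
def triZ (k : Nat) : Int := ((k * (k + 1) / 2 : Nat) : Int)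
-- A's sweep from the zero state (no sentinel)
def gA (l : List Char) : Int × Int := l.foldl stepA (0, 0)
-- the value B's triple abstracts: closed count plus triangle of the trailing run
def FA (l : List Char) : Int := (gA l).1 + triZ (sfxN l)

theorem fd_tri (k : Nat) :
    PySem.Int.floordiv ((k : Int) * ((k : Int) + 1)) 2 = triZ k := by
  have : ((k : Int) * ((k : Int) + 1)) = ((k * (k + 1) : Nat) : Int) := by push_cast; ring
  rw [this]
  exact_mod_cast PySem.Int.floordiv_natCast (k * (k + 1)) 2

theorem triN_succ (k : Nat) : (k + 1) * (k + 1 + 1) / 2 = k * (k + 1) / 2 + (k + 1) := by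
  rw [show (k + 1) * (k + 1 + 1) = k * (k + 1) + (k + 1) * 2 by ring,
    Nat.add_mul_div_right _ _ (by norm_num)]

theorem tri_succ (k : Nat) : triZ (k + 1) = triZ k + (k + 1 : Nat) := by
  unfold triZ; rw [triN_succ]; push_cast; ring

theorem tri_add (a b : Nat) : triZ (a + b) = triZ a + triZ b + (a : Int) * b := by
  induction b with
  | zero => simp [triZ]
  | succ b ih =>
      rw [show a + (b + 1) = (a + b) + 1 from rfl, tri_succ, ih, tri_succ]
      push_cast; ring

theorem pfx_cons_one (t : List Char) : pfxN ('1' :: t) = pfxN t + 1 := by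
  simp [pfxN, List.takeWhile]

theorem pfx_cons_ne (c : Char) (t : List Char) (hc : ¬ c = '1') : pfxN (c :: t) = 0 := by
  simp [pfxN, List.takeWhile, hc]

theorem pfx_eq_len_iff (l : List Char) : pfxN l = l.length ↔ ∀ c ∈ l, c = '1' := by
  constructor
  · intro h c hc
    have := (List.takeWhile_prefix (l := l) (fun c => decide (c = '1'))).eq_of_length h
    have := (List.takeWhile_eq_self_iff).mp this c hc
    simpa using this
  · intro h
    have : l.takeWhile (fun c => decide (c = '1')) = l :=
      List.takeWhile_eq_self_iff.mpr (by intro x hx; simpa using h x hx)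
    simp [pfxN, this]

theorem sfx_eq_len_iff (l : List Char) : sfxN l = l.length ↔ ∀ c ∈ l, c = '1' := by
  unfold sfxN
  rw [show l.length = l.reverse.length by simp, pfx_eq_len_iff]
  simp

-- Main sweep lemma: A's fold from an arbitrary state, characterised.
theorem sweep (l : List Char) : ∀ (ans : Int) (k : Nat),
    l.foldl stepA (ans, (k : Int)) =
      if pfxN l = l.length then (ans, (k : Int) + l.length)
      else (ans + triZ k + (k : Int) * (pfxN l) + (gA l).1, (gA l).2) := by
  induction l with
  | nil => intro ans k; simp [pfxN]
  | cons c t ih =>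
      intro ans k
      by_cases hc : c = '1'
      · subst hc
        have h1 : stepA (ans, (k : Int)) '1' = (ans, ((k + 1 : Nat) : Int)) := by
          rw [stepA, if_pos rfl]; norm_cast
        have hg : gA ('1' :: t) = t.foldl stepA (0, ((1 : Nat) : Int)) := by
          rw [gA, List.foldl_cons]
          have h2 : stepA (0, 0) '1' = (0, ((1 : Nat) : Int)) := by
            rw [stepA, if_pos rfl]; norm_cast
          rw [h2]
        rw [List.foldl_cons, h1, ih ans (k + 1), pfx_cons_one]
        by_cases hp : pfxN t = t.length
        · rw [if_pos hp, if_pos (show pfxN t + 1 = ('1' :: t).length by simp [hp])]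
          rw [Prod.mk.injEq]
          refine ⟨rfl, ?_⟩
          simp only [List.length_cons]
          push_cast; ring
        · rw [if_neg hp, if_neg (show ¬ (pfxN t + 1 = ('1' :: t).length) by
            simp only [List.length_cons]; omega)]
          rw [hg, ih 0 1, if_neg hp]
          rw [Prod.mk.injEq]
          refine ⟨?_, rfl⟩
          have ht1 : triZ 1 = 1 := by decide
          rw [tri_succ, ht1]
          push_cast; ring
      · have h1 : stepA (ans, (k : Int)) c = (ans + triZ k, ((0 : Nat) : Int)) := by
          rw [stepA, if_neg hc, fd_tri]; norm_cast
        have hg : gA (c :: t) = gA t := by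
          rw [gA, List.foldl_cons]
          have h0 : stepA (0, 0) c = (0, 0) := by rw [stepA, if_neg hc]; decide
          rw [h0]; rfl
        rw [List.foldl_cons, h1, ih (ans + triZ k) 0, pfx_cons_ne c t hc]
        rw [if_neg (show ¬ ((0 : Nat) = (c :: t).length) by simp)]
        have ht0 : triZ 0 = 0 := by decide
        by_cases hp : pfxN t = t.length
        · rw [if_pos hp, hg]
          have hgt : gA t = (0, (t.length : Int)) := by
            have h := ih 0 0
            rw [if_pos hp] at h
            simpa [gA] using h
          rw [hgt]
          rw [Prod.mk.injEq]
          constructor <;> simp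
        · rw [if_neg hp, hg]
          rw [Prod.mk.injEq]
          refine ⟨?_, rfl⟩
          simp [ht0]

theorem g_snd (l : List Char) : (gA l).2 = (sfxN l : Int) := by
  induction l using List.reverseRecOn with
  | nil => simp [gA, sfxN, pfxN]
  | append_singleton t c ih =>
      have h : gA (t ++ [c]) = stepA (gA t) c := by simp [gA, List.foldl_append]
      by_cases hc : c = '1'
      · subst hc
        have hs : sfxN (t ++ ['1']) = sfxN t + 1 := by
          simp [sfxN, pfx_cons_one]
        rw [h, hs]
        simp [stepA, ih]
      · have hs : sfxN (t ++ [c]) = 0 := by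
          simp [sfxN, pfx_cons_ne c _ hc]
        rw [h, hs]
        simp [stepA, hc]

theorem pfx_append (l1 l2 : List Char) :
    pfxN (l1 ++ l2) = if pfxN l1 = l1.length then l1.length + pfxN l2 else pfxN l1 := by
  unfold pfxN
  rw [List.takeWhile_append]
  split <;> simp_all

theorem sfx_append (l1 l2 : List Char) :
    sfxN (l1 ++ l2) = if sfxN l2 = l2.length then l2.length + sfxN l1 else sfxN l2 := by
  unfold sfxN
  rw [List.reverse_append, pfx_append]
  simp

theorem FA_append (l1 l2 : List Char) :
    FA (l1 ++ l2) = FA l1 + FA l2 + (sfxN l1 : Int) * (pfxN l2 : Int) := by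
  have hg : gA (l1 ++ l2) = l2.foldl stepA ((gA l1).1, (sfxN l1 : Int)) := by
    rw [gA, List.foldl_append, ← gA]
    congr 1
    exact Prod.ext rfl (g_snd l1)
  by_cases hp : pfxN l2 = l2.length
  · have hall : ∀ c ∈ l2, c = '1' := (pfx_eq_len_iff l2).mp hp
    have hs2 : sfxN l2 = l2.length := (sfx_eq_len_iff l2).mpr hall
    have hg2 : gA l2 = (0, (l2.length : Int)) := by
      have := sweep l2 0 0
      rw [if_pos hp] at this
      simpa [gA] using this
    unfold FA
    rw [hg, sweep l2 _ _, if_pos hp, sfx_append, if_pos hs2, hg2, hp, hs2]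
    rw [show l2.length + sfxN l1 = sfxN l1 + l2.length by omega, tri_add]
    push_cast; ring
  · have hs2 : ¬ sfxN l2 = l2.length := fun h =>
      hp ((pfx_eq_len_iff l2).mpr ((sfx_eq_len_iff l2).mp h))
    unfold FA
    rw [hg, sweep l2 _ _, if_neg hp, sfx_append, if_neg hs2]
    ring

theorem recB_eq (l : List Char) : recB l = (FA l, (pfxN l : Int), (sfxN l : Int)) := by
  rw [recB.eq_def]
  by_cases h0 : l.length = 0
  · have : l = [] := List.length_eq_zero_iff.mp h0
    subst this
    simp [FA, gA, sfxN, pfxN, triZ]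
  · rw [if_neg h0]
    by_cases h1 : l.length = 1
    · obtain ⟨c, rfl⟩ := List.length_eq_one_iff.mp h1
      rw [if_pos h1]
      by_cases hc : c = '1'
      · subst hc; decide
      · rw [if_neg (by simpa using hc)]
        simp [FA, gA, stepA, hc, sfxN, pfxN, triZ]
    · rw [if_neg h1]
      have hm1 : 1 ≤ l.length / 2 := by omega
      have hm2 : l.length / 2 < l.length := by omega
      have ih1 := recB_eq (l.take (l.length / 2))
      have ih2 := recB_eq (l.drop (l.length / 2))
      simp only [ih1, ih2]
      have hlen1 : (l.take (l.length / 2)).length = l.length / 2 := by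
        simp; omega
      have hlen2 : (l.drop (l.length / 2)).length = l.length - l.length / 2 := by simp
      have hsplit : l.take (l.length / 2) ++ l.drop (l.length / 2) = l :=
        List.take_append_drop _ _
      have hFA := FA_append (l.take (l.length / 2)) (l.drop (l.length / 2))
      rw [hsplit] at hFA
      have hPF := pfx_append (l.take (l.length / 2)) (l.drop (l.length / 2))
      rw [hsplit, hlen1] at hPF
      have hSF := sfx_append (l.take (l.length / 2)) (l.drop (l.length / 2))
      rw [hsplit, hlen2] at hSF
      refine Prod.ext ?_ (Prod.ext ?_ ?_)
      · simp only
        rw [hFA]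
      · simp only
        rw [hPF]
        by_cases hp : pfxN (l.take (l.length / 2)) = l.length / 2
        · rw [if_pos hp, if_pos (by exact_mod_cast congrArg (Nat.cast (R := Int)) hp), hp]
          push_cast; ring
        · rw [if_neg hp, if_neg (by exact_mod_cast fun h => hp (by exact_mod_cast h))]
          simp
      · simp only
        rw [hSF]
        by_cases hs : sfxN (l.drop (l.length / 2)) = l.length - l.length / 2
        · rw [if_pos hs, if_pos (by exact_mod_cast congrArg (Nat.cast (R := Int)) hs), hs]
          push_cast; ring
        · rw [if_neg hs, if_neg (by exact_mod_cast fun h => hs (by exact_mod_cast h))]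
          simp
termination_by l.length
decreasing_by
  · simpa using by omega
  · simpa using by omega

-- ===== VERDICT (by name: the statement is the Claim_ definition above) =====
theorem solve_spec : Claim_equal_solve := by
  intro s _
  unfold Spec_solve solve solve_alt
  rw [List.foldl_append, ← gA, recB_eq]
  have h : stepA (gA s.toList) '0' =
      ((gA s.toList).1 + PySem.Int.floordiv ((gA s.toList).2 * ((gA s.toList).2 + 1)) 2, 0) := by
    simp [stepA]
  simp only [List.foldl_cons, List.foldl_nil, h]
  rw [g_snd, fd_tri]
  rfl
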